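-- pv_equiv track=rewrite | github.com/pdyroy/Mealie-Restore | update_recipe_ingredients.py | map_food_name_to_id
-- ===== SOURCE A (Python) =====
-- def _normalize(s: str) -> str:
--     if not s:
--         return ""
--     s = s.strip().lower()
--     # very light umlaut normalization
--     s = s.replace("ä", "a").replace("ö", "o").replace("ü", "u").replace("ß", "ss")
--     return s
--
-- def map_food_name_to_id(food_name: str, food_mappings: dict) -> tuple[str | None, str | None]:
--     if not food_name:
--         return None, None
--     # Exact match by name (case-insensitive)
--     norm_target = _normalize(food_name)
--     for name, meta in food_mappings.items():
--         if _normalize(name) == norm_target: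
--             return meta.get("new_id"), name
--     # Loose startswith/contains fallback
--     for name, meta in food_mappings.items():
--         n = _normalize(name)
--         if norm_target in n or n in norm_target:
--             return meta.get("new_id"), name
--     return None, food_name
-- ===== SOURCE B (Python) =====
-- def _normalize(s: str) -> str:
--     if not s:
--         return ""
--     s = s.strip().lower()
--     s = s.replace("ä", "a").replace("ö", "o").replace("ü", "u").replace("ß", "ss")
--     return s
--
-- def map_food_name_to_id(food_name: str, food_mappings: dict) -> tuple[str | None, str | None]:
--     if not food_name:
--         return None, None
--     norm_target = _normalize(food_name)
--     fallback = None
--     for name, meta in food_mappings.items():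
--         n = _normalize(name)
--         if n == norm_target:
--             return meta.get("new_id"), name
--         if fallback is None and (norm_target in n or n in norm_target):
--             fallback = (meta.get("new_id"), name)
--     if fallback is not None:
--         return fallback
--     return None, food_name
-- ===== Notes on version B (the rewrite author's own statement) =====
-- stated objective: simpler
-- what changed: A's two full scans (exact pass, then loose pass) are replaced by a single pass that returns immediately on an exact normalized match and remembers only the first loose (substring) match as a fallback used after the loop.
import Mathlib
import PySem

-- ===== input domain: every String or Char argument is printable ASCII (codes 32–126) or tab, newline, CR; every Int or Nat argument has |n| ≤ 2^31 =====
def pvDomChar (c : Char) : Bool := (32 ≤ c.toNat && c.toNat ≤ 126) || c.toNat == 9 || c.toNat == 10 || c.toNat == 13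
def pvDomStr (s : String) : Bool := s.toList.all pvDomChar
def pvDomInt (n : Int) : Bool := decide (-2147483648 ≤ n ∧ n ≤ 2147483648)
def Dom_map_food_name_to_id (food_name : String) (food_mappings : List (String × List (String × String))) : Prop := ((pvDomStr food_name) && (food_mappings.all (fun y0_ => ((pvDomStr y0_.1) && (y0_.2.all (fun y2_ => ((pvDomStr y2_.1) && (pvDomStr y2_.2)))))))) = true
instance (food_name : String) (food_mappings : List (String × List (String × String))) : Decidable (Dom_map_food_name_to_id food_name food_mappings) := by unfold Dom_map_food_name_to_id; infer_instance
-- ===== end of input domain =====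

-- B replaces A's two full scans with a single pass keeping the first loose match as fallback; same results, simpler.


-- ===== PORT A =====
-- _normalize: strip, lower, then the four umlaut replaces (exact on the ASCII domain; the replaces are literal)
def pvNorm (s : String) : String :=
  if s = "" then ""
  else
    PySem.Str.replace
      (PySem.Str.replace
        (PySem.Str.replace
          (PySem.Str.replace (PySem.Str.lower (PySem.Str.strip s)) "ä" "a")
          "ö" "o")
        "ü" "u")
      "ß" "ss"

-- mt.get("new_id") on the association-list dict
def pvGetNewId (mt : List (String × String)) : Option String :=
  (PySem.Dict.mk mt).get? "new_id"

-- A's first loop: exact normalized match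
def pvExactLoop (t : String) : List (String × List (String × String)) → Option (Option String × Option String)
  | [] => none
  | (name, mt) :: rest =>
    if pvNorm name = t then some (pvGetNewId mt, some name) else pvExactLoop t rest

-- A's second loop: loose startswith/contains fallback
def pvLooseLoop (t : String) : List (String × List (String × String)) → Option (Option String × Option String)
  | [] => none
  | (name, mt) :: rest =>
    let n := pvNorm name
    if PySem.Str.isIn t n || PySem.Str.isIn n t then some (pvGetNewId mt, some name)
    else pvLooseLoop t rest

def map_food_name_to_id (food_name : String) (food_mappings : List (String × List (String × String))) : Option String × Option String :=
  if food_name = "" then (none, none)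
  else
    let t := pvNorm food_name
    match pvExactLoop t food_mappings with
    | some r => r
    | none =>
      match pvLooseLoop t food_mappings with
      | some r => r
      | none => (none, some food_name)

-- ===== PORT B =====
-- single pass: return at once on exact match, carry the first loose match as fallback
def pvScan (t : String) (fb : Option (Option String × Option String)) :
    List (String × List (String × String)) → Option (Option String × Option String)
  | [] => fb
  | (name, mt) :: rest =>
    let n := pvNorm name
    if n = t then some (pvGetNewId mt, some name)
    else
      pvScan t
        (if fb = none ∧ (PySem.Str.isIn t n || PySem.Str.isIn n t) then
          some (pvGetNewId mt, some name)
        else fb) rest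

def map_food_name_to_id_alt (food_name : String) (food_mappings : List (String × List (String × String))) : Option String × Option String :=
  if food_name = "" then (none, none)
  else
    let t := pvNorm food_name
    match pvScan t none food_mappings with
    | some r => r
    | none => (none, some food_name)

-- ===== PRECONDITION & SPEC =====
def Spec_map_food_name_to_id (food_name : String) (food_mappings : List (String × List (String × String))) (out : Option String × Option String) : Prop := out = map_food_name_to_id_alt food_name food_mappings
instance (food_name : String) (food_mappings : List (String × List (String × String))) (out : Option String × Option String) : Decidable (Spec_map_food_name_to_id food_name food_mappings out) := by unfold Spec_map_food_name_to_id; infer_instance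

-- ===== CLAIM (what is proved, stated in full; the proofs are below) =====
def Claim_equal_map_food_name_to_id : Prop := ∀ (food_name : String) (food_mappings : List (String × List (String × String))), Dom_map_food_name_to_id food_name food_mappings → Spec_map_food_name_to_id food_name food_mappings (map_food_name_to_id food_name food_mappings)

-- ===== LEMMAS AND PROOFS =====
-- the single pass equals: first exact match, else the carried fallback, else the first loose match
theorem pvScan_eq (t : String) (l : List (String × List (String × String)))
    (fb : Option (Option String × Option String)) :
    pvScan t fb l = (pvExactLoop t l).or (fb.or (pvLooseLoop t l)) := by
  induction l generalizing fb with
  | nil => simp [pvScan, pvExactLoop, pvLooseLoop]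
  | cons hd tl ih =>
    obtain ⟨name, mt⟩ := hd
    simp only [pvScan, pvExactLoop, pvLooseLoop]
    by_cases hx : pvNorm name = t
    · simp [hx]
    · by_cases hl : PySem.Chars.isIn t.toList (pvNorm name).toList = true ∨
          PySem.Chars.isIn (pvNorm name).toList t.toList = true
      · cases fb <;> simp [hx, hl, ih]
      · simp [hx, hl, ih]

-- ===== VERDICT (by name: the statement is the Claim_ definition above) =====
theorem map_food_name_to_id_spec : Claim_equal_map_food_name_to_id := by
  intro fn fm _
  show map_food_name_to_id fn fm = map_food_name_to_id_alt fn fm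
  by_cases h : fn = ""
  · simp [map_food_name_to_id, map_food_name_to_id_alt, h]
  · simp only [map_food_name_to_id, map_food_name_to_id_alt, h, pvScan_eq]
    cases pvExactLoop (pvNorm fn) fm with
    | some r => rfl
    | none => cases pvLooseLoop (pvNorm fn) fm <;> rfl
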